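-- pv_equiv track=rewrite | github.com/nlokeshiisc/GCFL_Release | Federated/data_utils.py | iid_divide
-- ===== SOURCE A (Python) =====
-- def iid_divide(data_ids, num_clients):
--     """
--     https://github.com/TalwalkarLab/leaf/blob/master/data/utils/sample.py
--     divide list `l` among `g` groups
--     each group has either `int(len(l)/g)` or `int(len(l)/g)+1` elements
--     returns a list of groups
--     """
--     num_elems = len(data_ids)
--     group_size = int(len(data_ids) / num_clients)
--     num_big_groups = num_elems - num_clients * group_size
--     num_small_groups = num_clients - num_big_groups
--     glist = []
--     for i in range(num_small_groups):
--         glist.append(data_ids[group_size * i: group_size * (i + 1)])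
--     bi = group_size * num_small_groups
--     group_size += 1
--     for i in range(num_big_groups):
--         glist.append(data_ids[bi + group_size * i:bi + group_size * (i + 1)])
--     return glist
-- ===== SOURCE B (Python) =====
-- def iid_divide(data_ids, num_clients):
--     """Divide data_ids among num_clients groups (each of size len//g or len//g+1).
--
--     Greedy peel: while groups remain, the next group takes
--     (remaining elements) // (groups left) elements; no precomputed group
--     counts and no index formulas.
--     """
--     glist = []
--     pos = 0
--     g = num_clients
--     while g > 0:
--         k = (len(data_ids) - pos) // g
--         glist.append(data_ids[pos:pos + k])
--         pos += k
--         g -= 1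
--     return glist
-- ===== Notes on version B (the rewrite author's own statement) =====
-- stated objective: alternative
-- what changed: Replaces A's precomputed group counts and two index-formula loops with a greedy recursive peel: each step takes len(rest)//groups_left elements and recurses on the rest with one group fewer.
-- outside the precondition, e.g. on iid_divide([0, 1, 2, 3, 4], -2): A returns [[]], B returns []
import Mathlib
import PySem

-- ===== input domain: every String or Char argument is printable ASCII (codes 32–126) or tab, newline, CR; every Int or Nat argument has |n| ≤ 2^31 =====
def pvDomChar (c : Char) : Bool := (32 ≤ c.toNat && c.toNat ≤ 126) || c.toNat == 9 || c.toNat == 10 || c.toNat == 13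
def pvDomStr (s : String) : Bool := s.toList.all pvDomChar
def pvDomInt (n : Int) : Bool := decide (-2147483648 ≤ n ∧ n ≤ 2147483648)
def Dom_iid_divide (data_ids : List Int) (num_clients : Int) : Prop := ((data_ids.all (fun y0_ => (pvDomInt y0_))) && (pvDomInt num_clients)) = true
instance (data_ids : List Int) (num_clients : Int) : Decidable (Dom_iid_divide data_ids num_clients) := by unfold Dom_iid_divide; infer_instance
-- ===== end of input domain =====

-- B replaces A's precomputed group counts and two index-formula loops with a greedy
-- recursive peel (next group = len(rest)//groups_left elements); objective: alternative.

-- ===== PORT A =====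
-- int(len(data_ids) / num_clients): float true division then int() truncates toward
-- zero = Int.tdiv (exact for the list lengths and divisors in the admitted domain).
def iid_divide (data_ids : List Int) (num_clients : Int) : List (List Int) :=
  let num_elems : Int := data_ids.length
  let group_size : Int := Int.tdiv num_elems num_clients
  let num_big_groups : Int := num_elems - num_clients * group_size
  let num_small_groups : Int := num_clients - num_big_groups
  let glist : List (List Int) :=
    (PySem.List.pyRange 0 num_small_groups 1).foldl
      (fun g i => g ++ [PySem.List.slice data_ids (some (group_size * i)) (some (group_size * (i + 1)))]) []
  let bi : Int := group_size * num_small_groups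
  let group_size2 : Int := group_size + 1
  (PySem.List.pyRange 0 num_big_groups 1).foldl
    (fun g i => g ++ [PySem.List.slice data_ids (some (bi + group_size2 * i)) (some (bi + group_size2 * (i + 1)))]) glist

-- ===== PORT B =====
-- B's while-loop peels one group per step; the loop variable g counts down from
-- num_clients, realised structurally on num_clients.toNat (= 0 exactly when
-- num_clients <= 0, where the loop body never runs); pos is the running position.
def iid_divide_alt_go (data_ids : List Int) : Nat -> Int -> List (List Int)
  | 0, _ => []
  | m + 1, pos =>
    let k : Int := PySem.Int.floordiv ((data_ids.length : Int) - pos) ((m : Int) + 1)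
    PySem.List.slice data_ids (some pos) (some (pos + k)) ::
      iid_divide_alt_go data_ids m (pos + k)

def iid_divide_alt (data_ids : List Int) (num_clients : Int) : List (List Int) :=
  iid_divide_alt_go data_ids num_clients.toNat 0

-- ===== PRECONDITION & SPEC =====
-- Pre_ restricts to the natural domain: num_clients = 0 raises ZeroDivisionError in A,
-- and a negative number of clients is outside the function's purpose (A's values there
-- come from negative slice indices); excluded, with a cite in the claim.
def Pre_iid_divide (data_ids : List Int) (num_clients : Int) : Prop := 0 < num_clients
instance (data_ids : List Int) (num_clients : Int) : Decidable (Pre_iid_divide data_ids num_clients) := by unfold Pre_iid_divide; infer_instance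
def pvWitness_iid_divide : List Int × Int := ([3, 1, 4, 1, 5], 2)

def Spec_iid_divide (data_ids : List Int) (num_clients : Int) (out : List (List Int)) : Prop := out = iid_divide_alt data_ids num_clients
instance (data_ids : List Int) (num_clients : Int) (out : List (List Int)) : Decidable (Spec_iid_divide data_ids num_clients out) := by unfold Spec_iid_divide; infer_instance

-- ===== CLAIM (what is proved, stated in full; the proofs are below) =====
def Claim_equal_iid_divide : Prop := ∀ (data_ids : List Int) (num_clients : Int), Dom_iid_divide data_ids num_clients → Pre_iid_divide data_ids num_clients → Spec_iid_divide data_ids num_clients (iid_divide data_ids num_clients)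

-- ===== LEMMAS AND PROOFS =====

-- Proof-only helpers: the common normal form both ports are reduced to.
-- 'chunks xs sizes' cuts xs into consecutive pieces of the given lengths.
def chunks : List Int → List Nat → List (List Int)
  | _, [] => []
  | xs, s :: ss => xs.take s :: chunks (xs.drop s) ss

-- the small-groups-first sizes table for n elements in g groups
def gsizes (n g : Nat) : List Nat :=
  List.replicate (g - n % g) (n / g) ++ List.replicate (n % g) (n / g + 1)

theorem chunks_append (s1 s2 : List Nat) (xs : List Int) :
    chunks xs (s1 ++ s2) = chunks xs s1 ++ chunks (xs.drop s1.sum) s2 := by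
  induction s1 generalizing xs with
  | nil => simp [chunks]
  | cons s ss ih =>
    simp only [List.cons_append, chunks, ih, List.drop_drop, List.sum_cons]

theorem chunks_replicate (k q : Nat) (xs : List Int) :
    chunks xs (List.replicate k q)
      = (List.range k).map (fun i => (xs.drop (q * i)).take q) := by
  induction k generalizing xs with
  | zero => simp [chunks]
  | succ k ih =>
    have h0 : chunks xs (List.replicate (k + 1) q)
        = xs.take q :: chunks (xs.drop q) (List.replicate k q) := rfl
    rw [h0, ih, List.range_succ_eq_map, List.map_cons, List.map_map]
    refine congrArg₂ _ (by simp) ?_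
    apply List.map_congr_left
    intro i _
    simp only [Function.comp_apply, Nat.succ_eq_add_one, List.drop_drop]
    exact congrArg (fun m => (xs.drop m).take q) (by ring)

-- the peel step of the sizes table: the first group is small, the rest is the
-- table for one group fewer on the remaining elements
theorem gsizes_cons (n g : Nat) :
    gsizes n (g + 2) = n / (g + 2) :: gsizes (n - n / (g + 2)) (g + 1) := by
  have hrlt : n % (g + 2) < g + 2 := Nat.mod_lt _ (by omega)
  have hqn : (g + 2) * (n / (g + 2)) + n % (g + 2) = n := Nat.div_add_mod n (g + 2)
  have hsplit : (g + 2) * (n / (g + 2)) = (g + 1) * (n / (g + 2)) + n / (g + 2) := by ring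
  have hm : n - n / (g + 2) = n % (g + 2) + (g + 1) * (n / (g + 2)) := by omega
  by_cases hcase : n % (g + 2) = g + 1
  · have hdiv : (n - n / (g + 2)) / (g + 1) = n / (g + 2) + 1 := by
      rw [hm, hcase,
          show g + 1 + (g + 1) * (n / (g + 2)) = 0 + (g + 1) * (n / (g + 2) + 1) by ring,
          Nat.add_mul_div_left _ _ (by omega)]
      simp
    have hmod : (n - n / (g + 2)) % (g + 1) = 0 := by
      rw [hm, hcase,
          show g + 1 + (g + 1) * (n / (g + 2)) = 0 + (g + 1) * (n / (g + 2) + 1) by ring]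
      simp
    unfold gsizes
    rw [hdiv, hmod, hcase]
    simp [List.replicate_succ]
  · have hrle : n % (g + 2) ≤ g := by omega
    have hdiv : (n - n / (g + 2)) / (g + 1) = n / (g + 2) := by
      rw [hm, Nat.add_mul_div_left _ _ (by omega), Nat.div_eq_of_lt (by omega)]
      simp
    have hmod : (n - n / (g + 2)) % (g + 1) = n % (g + 2) := by
      rw [hm, Nat.add_mul_mod_self_left, Nat.mod_eq_of_lt (by omega)]
    unfold gsizes
    rw [hdiv, hmod,
        show g + 2 - n % (g + 2) = (g + 1 - n % (g + 2)) + 1 by omega,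
        List.replicate_succ]
    simp

-- B's peel loop computes exactly the chunks of the sizes table.
theorem alt_go_eq (g : Nat) : ∀ (xs : List Int) (p : Nat), p ≤ xs.length →
    iid_divide_alt_go xs (g + 1) ((p : Nat) : Int)
      = chunks (xs.drop p) (gsizes (xs.length - p) (g + 1)) := by
  induction g with
  | zero =>
    intro xs p hp
    show PySem.List.slice xs (some ((p : Nat) : Int))
          (some (((p : Nat) : Int) + PySem.Int.floordiv ((xs.length : Int) - ((p : Nat) : Int)) ((0 : Int) + 1))) ::
        iid_divide_alt_go xs 0 _ = _
    rw [show ((xs.length : Int) - ((p : Nat) : Int)) = ((xs.length - p : Nat) : Int) by omega,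
        show ((0 : Int) + 1) = ((1 : Nat) : Int) by norm_num,
        PySem.Int.floordiv_natCast,
        show ((p : Nat) : Int) + ((xs.length - p) / 1 : Nat) = ((p + (xs.length - p) / 1 : Nat) : Int) by push_cast; ring,
        PySem.List.slice_natCast]
    simp [iid_divide_alt_go, gsizes, chunks, Nat.mod_one, Nat.div_one, List.take_drop]
  | succ g ih =>
    intro xs p hp
    show PySem.List.slice xs (some ((p : Nat) : Int))
          (some (((p : Nat) : Int) + PySem.Int.floordiv ((xs.length : Int) - ((p : Nat) : Int)) (((g + 1 : Nat) : Int) + 1))) ::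
        iid_divide_alt_go xs (g + 1)
          (((p : Nat) : Int) + PySem.Int.floordiv ((xs.length : Int) - ((p : Nat) : Int)) (((g + 1 : Nat) : Int) + 1)) = _
    have hk : (xs.length - p) / (g + 2) ≤ xs.length - p := Nat.div_le_self _ _
    rw [show ((xs.length : Int) - ((p : Nat) : Int)) = ((xs.length - p : Nat) : Int) by omega,
        show (((g + 1 : Nat) : Int) + 1) = ((g + 2 : Nat) : Int) by push_cast; ring,
        PySem.Int.floordiv_natCast,
        show ((p : Nat) : Int) + (((xs.length - p) / (g + 2) : Nat) : Int)
          = ((p + (xs.length - p) / (g + 2) : Nat) : Int) by push_cast; ring,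
        PySem.List.slice_natCast,
        ih xs (p + (xs.length - p) / (g + 2)) (by omega),
        gsizes_cons]
    have h1 : xs.length - (p + (xs.length - p) / (g + 2))
        = xs.length - p - (xs.length - p) / (g + 2) := by omega
    have h2 : List.drop (p + (xs.length - p) / (g + 2)) xs
        = (xs.drop p).drop ((xs.length - p) / (g + 2)) := by
      rw [List.drop_drop]
    rw [h1, h2]
    rw [show chunks (xs.drop p)
          ((xs.length - p) / (g + 2) :: gsizes (xs.length - p - (xs.length - p) / (g + 2)) (g + 1))
        = (xs.drop p).take ((xs.length - p) / (g + 2)) ::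
            chunks ((xs.drop p).drop ((xs.length - p) / (g + 2)))
              (gsizes (xs.length - p - (xs.length - p) / (g + 2)) (g + 1)) from rfl]
    exact congrArg₂ _ (congrArg₂ List.take (by simp) rfl) rfl

-- A's append-singleton loop over range(0, m), characterised as a map.
theorem pyrange_loop {α : Type} (m : Int) (f : Int → α) (acc : List α) :
    (PySem.List.pyRange 0 m 1).foldl (fun g i => g ++ [f i]) acc
      = acc ++ (List.range m.toNat).map (fun (k : Nat) => f (k : Int)) := by
  rw [PySem.List.pyRange_one, List.foldl_map, PySem.List.foldl_append_singleton_eq_map]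
  congr 1
  simp only [sub_zero]
  apply List.map_congr_left
  intro k _
  norm_num

-- A's two loops compute exactly the chunks of the sizes table.
theorem a_eq_chunks (g : Nat) (xs : List Int) :
    iid_divide xs ((g : Int) + 1) = chunks xs (gsizes xs.length (g + 1)) := by
  have hrlt : xs.length % (g + 1) < g + 1 := Nat.mod_lt _ (by omega)
  have hdm : (g + 1) * (xs.length / (g + 1)) + xs.length % (g + 1) = xs.length :=
    Nat.div_add_mod xs.length (g + 1)
  unfold iid_divide
  simp only []
  have htd : Int.tdiv (xs.length : Int) ((g : Int) + 1)
      = ((xs.length / (g + 1) : Nat) : Int) := by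
    rw [Int.tdiv_eq_ediv_of_nonneg (by positivity),
        ← PySem.Int.floordiv_eq_ediv_of_pos (by omega),
        show ((g : Int) + 1) = ((g + 1 : Nat) : Int) by push_cast; ring,
        PySem.Int.floordiv_natCast]
  rw [htd]
  have hbig : (xs.length : Int) - ((g : Int) + 1) * ((xs.length / (g + 1) : Nat) : Int)
      = ((xs.length % (g + 1) : Nat) : Int) := by
    rw [show ((g : Int) + 1) * ((xs.length / (g + 1) : Nat) : Int)
          = (((g + 1) * (xs.length / (g + 1)) : Nat) : Int) by push_cast; ring]
    omega
  rw [hbig]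
  have hsmall : ((g : Int) + 1) - ((xs.length % (g + 1) : Nat) : Int)
      = ((g + 1 - xs.length % (g + 1) : Nat) : Int) := by omega
  rw [hsmall, pyrange_loop, pyrange_loop]
  simp only [List.nil_append, Int.toNat_natCast]
  unfold gsizes
  rw [chunks_append, chunks_replicate, chunks_replicate]
  congr 1
  · apply List.map_congr_left
    intro i _
    rw [show ((xs.length / (g + 1) : Nat) : Int) * (i : Int)
          = ((xs.length / (g + 1) * i : Nat) : Int) by push_cast; ring,
        show ((xs.length / (g + 1) : Nat) : Int) * ((i : Int) + 1)
          = ((xs.length / (g + 1) * i + xs.length / (g + 1) : Nat) : Int) by push_cast; ring,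
        PySem.List.slice_natCast]
    exact congrArg₂ List.take (by simp) rfl
  · rw [List.sum_replicate, smul_eq_mul]
    apply List.map_congr_left
    intro i _
    rw [show ((xs.length / (g + 1) : Nat) : Int) * ((g + 1 - xs.length % (g + 1) : Nat) : Int)
            + (((xs.length / (g + 1) : Nat) : Int) + 1) * (i : Int)
          = (((g + 1 - xs.length % (g + 1)) * (xs.length / (g + 1))
              + (xs.length / (g + 1) + 1) * i : Nat) : Int) by push_cast; ring,
        show ((xs.length / (g + 1) : Nat) : Int) * ((g + 1 - xs.length % (g + 1) : Nat) : Int)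
            + (((xs.length / (g + 1) : Nat) : Int) + 1) * ((i : Int) + 1)
          = (((g + 1 - xs.length % (g + 1)) * (xs.length / (g + 1))
              + (xs.length / (g + 1) + 1) * i + (xs.length / (g + 1) + 1) : Nat) : Int) by
            push_cast; ring,
        PySem.List.slice_natCast, List.drop_drop]
    exact congrArg₂ List.take (by simp) rfl

-- ===== VERDICT (by name: the statement is the Claim_ definition above) =====
theorem iid_divide_spec : Claim_equal_iid_divide := by
  intro data_ids num_clients _ hpre
  have hpos : 0 < num_clients := hpre
  unfold Spec_iid_divide
  obtain ⟨g, rfl⟩ : ∃ g : Nat, num_clients = (g : Int) + 1 :=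
    ⟨(num_clients - 1).toNat, by omega⟩
  rw [a_eq_chunks]
  unfold iid_divide_alt
  rw [show ((g : Int) + 1).toNat = g + 1 by omega,
      show (0 : Int) = ((0 : Nat) : Int) by norm_num,
      alt_go_eq g data_ids 0 (by omega)]
  simp
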